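-- pv_equiv track=rewrite | github.com/Strannik93/Python | L4Task1.py | convert_equation_dict
-- ===== SOURCE A (Python) =====
-- def convert_equation_dict(equation_text: str):
--     equation = {}
--     equation_text = equation_text.replace(' ', '').replace('*', '').replace('=0', '').replace('+', ' ').replace('-', ' -').split()
--     if equation_text[len(equation_text)-1].startswith('-'):
--         temp = 0
--         for i in range(1, len(equation_text[len(equation_text)-1])):
--             if equation_text[len(equation_text)-1][i].isdigit():
--                 temp += 1
--         if temp == len(equation_text[len(equation_text)-1]) - 1:
--             equation_text[len(equation_text)-1] += 'x0'
--     else: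
--         if equation_text[len(equation_text)-1].isdigit():
--             equation_text[len(equation_text)-1] += 'x0'
--     for i in range(len(equation_text)):
--         if (equation_text[i].startswith('x') or equation_text[i].startswith('-x')) and equation_text[i].endswith('x'):
--             equation_text[i] = equation_text[i].replace('x', '1x1').split('x')
--         elif equation_text[i].endswith('x'):
--             equation_text[i] = equation_text[i].replace('x', 'x1').split('x')
--         elif equation_text[i].startswith('x') or equation_text[i].startswith('-x'):
--             equation_text[i] = equation_text[i].replace('x', '1x').split('x')
--         else:
--             equation_text[i] = equation_text[i].split('x')
--     j = 0
--     for i in range(int(equation_text[0][1]), -1, -1):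
--         if j <= len(equation_text)-1:
--             if int(equation_text[j][1]) == i:
--                 equation[i] = int(equation_text[j][0])
--                 j += 1
--             else:
--                 equation[i] = 0
--         else:
--             equation[i] = 0
--     return equation
-- ===== SOURCE B (Python) =====
-- def convert_equation_dict(equation_text: str):
--     s = equation_text.replace(' ', '').replace('*', '').replace('=0', '')
--     terms = []
--     i, n = 0, len(s)
--     while i < n:
--         neg = False
--         if s[i] in '+-':
--             neg = s[i] == '-'
--             i += 1
--         j = i
--         while j < n and s[j].isdigit():
--             j += 1
--         digits = s[i:j]
--         if j < n and s[j] == 'x':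
--             coeff = int(('-' if neg else '') + (digits or '1'))
--             k = j + 1
--             while k < n and s[k].isdigit():
--                 k += 1
--             power = int(s[j + 1:k]) if k > j + 1 else 1
--             i = k
--         else:
--             coeff = int(('-' if neg else '') + digits)
--             power = 0
--             i = j
--         terms.append((coeff, power))
--     equation = {}
--     t = 0
--     for p in range(terms[0][1], -1, -1):
--         if t < len(terms) and terms[t][1] == p:
--             equation[p] = terms[t][0]
--             t += 1
--         else:
--             equation[p] = 0
--     return equation
-- ===== Notes on version B (the rewrite author's own statement) =====
-- stated objective: alternative
-- what changed: B replaces A's chain of replace()-based string surgery (sign-to-space splitting, per-token 'x'->'1x1' rewriting and re-splitting, last-token 'x0' patching) with a single left-to-right character scan that parses each signed term directly into a (coefficient, power) pair, then fills the dict with the same descending-degree loop.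
-- outside the precondition, e.g. on convert_equation_dict('x2++3'): A returns {2: 1, 1: 0, 0: 3}, B raises ValueError; on convert_equation_dict('3x-'): A returns {1: 3, 0: -1}, B raises ValueError; on convert_equation_dict('x\tx2'): A returns {1: 1, 0: 0}, B raises ValueError
import Mathlib
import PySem

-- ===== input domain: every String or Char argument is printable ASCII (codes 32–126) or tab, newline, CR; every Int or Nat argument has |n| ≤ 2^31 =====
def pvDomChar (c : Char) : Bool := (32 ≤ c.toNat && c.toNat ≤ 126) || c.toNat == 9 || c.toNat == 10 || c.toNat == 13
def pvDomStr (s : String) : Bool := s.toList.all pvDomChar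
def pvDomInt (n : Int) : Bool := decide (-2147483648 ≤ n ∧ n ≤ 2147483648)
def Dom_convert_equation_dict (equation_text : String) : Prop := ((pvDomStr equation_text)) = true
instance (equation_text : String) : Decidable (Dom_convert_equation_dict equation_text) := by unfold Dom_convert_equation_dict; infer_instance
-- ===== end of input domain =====

-- B replaces A's replace()-chain string surgery and per-token 'x'-rewriting with a single
-- left-to-right character scan parsing each signed term into a (coefficient, power) pair;
-- the descending-degree dict fill is kept.  Objective: alternative (same cost).

-- ===== PORT A =====
-- A-side helper: the in-place 'x0' patch A applies to the last token
def fixLastA (last : List Char) : List Char :=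
  if PySem.Chars.startswith last ['-'] then
    let temp : Int := (PySem.List.pyRange 1 (last.length : Int) 1).foldl
      (fun temp i => if PySem.Chars.isdigit (PySem.List.pyGetD last i '?') then temp + 1 else temp) 0
    if temp = (last.length : Int) - 1 then last ++ ['x', '0'] else last
  else
    if PySem.Chars.strIsdigit last then last ++ ['x', '0'] else last

-- A-side helper: the four-branch replace/split mangling of one token
def mangleA (t : List Char) : List (List Char) :=
  if (PySem.Chars.startswith t ['x'] || PySem.Chars.startswith t ['-', 'x']) && PySem.Chars.endswith t ['x'] then
    PySem.Chars.splitOn (PySem.Chars.replace t ['x'] ['1', 'x', '1']) ['x']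
  else if PySem.Chars.endswith t ['x'] then
    PySem.Chars.splitOn (PySem.Chars.replace t ['x'] ['x', '1']) ['x']
  else if PySem.Chars.startswith t ['x'] || PySem.Chars.startswith t ['-', 'x'] then
    PySem.Chars.splitOn (PySem.Chars.replace t ['x'] ['1', 'x']) ['x']
  else
    PySem.Chars.splitOn t ['x']

-- A-side helper: int(parts[j][k]) (the IndexError/ValueError cases are excluded by Pre_)
def pvIntAt (ps : List (List (List Char))) (j k : Int) : Int :=
  (PySem.Int.ofChars? (PySem.List.pyGetD (PySem.List.pyGetD ps j []) k [])).getD 0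

def convert_equation_dict (equation_text : String) : List (Int × Int) :=
  let toks0 := PySem.Chars.split₀
    (PySem.Chars.replace
      (PySem.Chars.replace
        (PySem.Chars.replace
          (PySem.Chars.replace
            (PySem.Chars.replace equation_text.toList [' '] [])
            ['*'] [])
          ['=', '0'] [])
        ['+'] [' '])
      ['-'] [' ', '-'])
  match toks0.getLast? with
  | none => []                      -- Python: IndexError on equation_text[-1] (outside Pre_)
  | some last =>
    let toks := toks0.dropLast ++ [fixLastA last]
    let parts := toks.map mangleA
    let n : Int := (toks.length : Int)
    ((PySem.List.pyRange (pvIntAt parts 0 1) (-1) (-1)).foldl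
      (fun (st : PySem.Dict Int Int × Int) i =>
        if st.2 ≤ n - 1 then
          if pvIntAt parts st.2 1 = i then (st.1.insert i (pvIntAt parts st.2 0), st.2 + 1)
          else (st.1.insert i 0, st.2)
        else (st.1.insert i 0, st.2))
      (PySem.Dict.empty, 0)).1.items

-- ===== PORT B =====
-- B-side helper: the character-scan tokenizer of Source B, one (coeff, power) pair per signed
-- term; the index arithmetic of the while loop becomes takeWhile/drop on the same list, and
-- fuel = length + 1 only makes the recursion structural (each parsed term consumes at least
-- one character, so inside Pre_ the fuel never runs out).
def parseTermsB : Nat → List Char → List (Int × Int)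
  | 0, _ => []
  | _ + 1, [] => []
  | fuel + 1, c :: rest =>
    let neg := c == '-'
    let l1 := if c == '+' || c == '-' then rest else c :: rest
    let ds := l1.takeWhile PySem.Chars.isdigit
    let sign : List Char := if neg then ['-'] else []
    match l1.drop ds.length with
    | 'x' :: r2 =>
      let pd := r2.takeWhile PySem.Chars.isdigit
      ((PySem.Int.ofChars? (sign ++ (if ds.isEmpty then ['1'] else ds))).getD 0,
        if pd.isEmpty then 1 else (PySem.Int.ofChars? pd).getD 0) :: parseTermsB fuel (r2.drop pd.length)
    | r => ((PySem.Int.ofChars? (sign ++ ds)).getD 0, 0) :: parseTermsB fuel r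

def convert_equation_dict_alt (equation_text : String) : List (Int × Int) :=
  let s := PySem.Chars.replace
    (PySem.Chars.replace
      (PySem.Chars.replace equation_text.toList [' '] [])
      ['*'] [])
    ['=', '0'] []
  let terms := parseTermsB (s.length + 1) s
  match terms with
  | [] => []                        -- Python: IndexError on terms[0] (outside Pre_)
  | t0 :: _ =>
    let n : Int := (terms.length : Int)
    ((PySem.List.pyRange t0.2 (-1) (-1)).foldl
      (fun (st : PySem.Dict Int Int × Int) p =>
        if st.2 < n then
          if (PySem.List.pyGetD terms st.2 ((0 : Int), (0 : Int))).2 = p then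
            (st.1.insert p (PySem.List.pyGetD terms st.2 ((0 : Int), (0 : Int))).1, st.2 + 1)
          else (st.1.insert p 0, st.2)
        else (st.1.insert p 0, st.2))
      (PySem.Dict.empty, 0)).1.items

-- ===== PRECONDITION & SPEC =====
-- Closed-form grammar of the inputs Pre_ admits, used only to state Pre_: the cleaned body is
-- split at its '+'/'-' signs into sign-free cores, and each core must look like
-- digits 'x' digits? (a term), the last one alternatively like digits (a constant).
def notSign (c : Char) : Bool := !(c = '+' || c = '-')

def splitCores (cur : List Char) (neg : Bool) : List Char → List (Bool × List Char)
  | [] => [(neg, cur.reverse)]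
  | c :: r => if notSign c then splitCores (c :: cur) neg r
              else (neg, cur.reverse) :: splitCores [] (c == '-') r

def parseAll (b : List Char) : List (Bool × List Char) :=
  match b with
  | '+' :: r => splitCores [] false r
  | '-' :: r => splitCores [] true r
  | _ => splitCores [] false b

def coreTermOK (core : List Char) : Bool :=
  match core.drop (core.takeWhile PySem.Chars.isdigit).length with
  | 'x' :: es => es.all PySem.Chars.isdigit
  | _ => false

def coreLastOK (core : List Char) : Bool :=
  coreTermOK core || PySem.Chars.strIsdigit core

def wfTerms (ts : List (Bool × List Char)) : Bool :=
  ts.dropLast.all (fun p => coreTermOK p.2) &&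
    (match ts.getLast? with
     | some p => coreLastOK p.2
     | none => false)

-- Pre_ admits well-formed polynomial equations: after discarding ' ' and '*' and an optional
-- trailing '=0', the text is optionally signed terms [digits]['x'[digits]] joined by single
-- '+'/'-' signs with a bare constant only in last position.  It excludes malformed strings on
-- which A still returns a value fabricated by its replace-chain (doubled or dangling signs,
-- adjacent 'x's, tab/newline separators, stray '=') — B's scanner raises or parses those
-- differently.
def Pre_convert_equation_dict (equation_text : String) : Prop :=
  (let f := equation_text.toList.filter (fun c => !(c == ' ' || c == '*'))
   let b := if ['=', '0'].isSuffixOf f then f.dropLast.dropLast else f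
   !(b.contains '=') && wfTerms (parseAll b)) = true

instance (equation_text : String) : Decidable (Pre_convert_equation_dict equation_text) := by
  unfold Pre_convert_equation_dict; infer_instance

def pvWitness_convert_equation_dict : String := "x2 + 3x - 4 = 0"

def Spec_convert_equation_dict (equation_text : String) (out : List (Int × Int)) : Prop := out = convert_equation_dict_alt equation_text
instance (equation_text : String) (out : List (Int × Int)) : Decidable (Spec_convert_equation_dict equation_text out) := by unfold Spec_convert_equation_dict; infer_instance

-- ===== CLAIM =====
def Claim_equal_convert_equation_dict : Prop := ∀ (equation_text : String), Dom_convert_equation_dict equation_text → Pre_convert_equation_dict equation_text → Spec_convert_equation_dict equation_text (convert_equation_dict equation_text)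

-- ===== LEMMAS AND PROOFS =====

theorem pv_witness_ok : Dom_convert_equation_dict pvWitness_convert_equation_dict ∧ Pre_convert_equation_dict pvWitness_convert_equation_dict := by
  constructor <;> decide


-- proof-side structures
def tokenOf (p : Bool × List Char) : List Char := (if p.1 then ['-'] else []) ++ p.2

def renderTail (ts : List (Bool × List Char)) : List Char :=
  ts.flatMap (fun p => ' ' :: tokenOf p)

def gSub (c : Char) : List Char :=
  if c = '+' then [' '] else if c = '-' then [' ', '-'] else [c]

def tailTerms (cs : List Char) : List (Bool × List Char) :=
  match cs.dropWhile notSign with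
  | [] => []
  | c :: r => splitCores [] (c == '-') r

theorem splitCores_eq (cur : List Char) (neg : Bool) (cs : List Char) :
    splitCores cur neg cs = (neg, cur.reverse ++ cs.takeWhile notSign) :: tailTerms cs := by
  induction cs generalizing cur with
  | nil => simp [splitCores, tailTerms]
  | cons c r ih =>
    by_cases hc : notSign c = true
    · simp [splitCores, hc, tailTerms, List.dropWhile_cons, ih]
    · simp at hc
      simp [splitCores, hc, tailTerms, List.dropWhile_cons]

-- the (coefficient, power) reading shared by both sides
def pairOf (p : Bool × List Char) : Int × Int :=
  let ds := p.2.takeWhile PySem.Chars.isdigit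
  match p.2.drop ds.length with
  | 'x' :: es =>
    ((PySem.Int.ofChars? ((if p.1 then ['-'] else []) ++ (if ds.isEmpty then ['1'] else ds))).getD 0,
      if es.isEmpty then 1 else (PySem.Int.ofChars? es).getD 0)
  | _ => ((PySem.Int.ofChars? ((if p.1 then ['-'] else []) ++ ds)).getD 0, 0)

def fOf (e : List (List Char)) : Int × Int :=
  ((PySem.Int.ofChars? (PySem.List.pyGetD e 0 [])).getD 0,
   (PySem.Int.ofChars? (PySem.List.pyGetD e 1 [])).getD 0)

-- character facts
theorem digit_toNat {c : Char} (h : PySem.Chars.isdigit c = true) : 48 ≤ c.toNat ∧ c.toNat ≤ 57 := by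
  simp only [PySem.Chars.isdigit, Bool.and_eq_true, decide_eq_true_eq, Char.le_def] at h
  exact ⟨h.1, h.2⟩

theorem digit_not_space {c : Char} (h : PySem.Chars.isdigit c = true) : PySem.Chars.isspace c = false := by
  obtain ⟨h1, h2⟩ := digit_toNat h
  simp only [PySem.Chars.isspace, Bool.or_eq_false_iff, Bool.and_eq_false_iff, decide_eq_false_iff_not]
  omega

theorem digit_ne {c : Char} (d : Char) (hd : 128 ≤ d.toNat ∨ d.toNat ≤ 47 ∨ 58 ≤ d.toNat)
    (h : PySem.Chars.isdigit c = true) : ¬(c = d) := by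
  obtain ⟨h1, h2⟩ := digit_toNat h
  rintro rfl; omega

theorem drop_takeWhile_length (p : Char → Bool) (l : List Char) :
    l.drop (l.takeWhile p).length = l.dropWhile p := by
  induction l with
  | nil => simp
  | cons c t ih => by_cases h : p c <;> simp [List.dropWhile_cons, h, ih]

-- replace with a single-character pattern is a flatMap
theorem rep_go_one (o : Char) (new : List Char) :
    ∀ (l : List Char) (fuel : Nat) (acc : List Char), l.length ≤ fuel →
      PySem.Chars.replace.go [o] new fuel l acc =
        acc.reverse ++ l.flatMap (fun c => if c = o then new else [c]) := by
  intro l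
  induction l with
  | nil => intro fuel acc _; cases fuel <;> simp [PySem.Chars.replace.go]
  | cons c t ih =>
    intro fuel acc hf
    cases fuel with
    | zero => simp at hf
    | succ f =>
      rw [PySem.Chars.replace.go]
      simp only [List.isPrefixOf, List.length_cons] at *
      by_cases hco : (o == c) = true
      · simp only [hco, Bool.true_and]
        simp only [if_true, List.length_nil, List.drop_succ_cons, List.drop_zero, Nat.zero_add]
        rw [ih f (new.reverse ++ acc) (by omega)]
        simp at hco
        simp [hco, List.flatMap_cons]
      · simp only [hco, Bool.false_and, if_false]
        rw [ih f (c :: acc) (by omega)]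
        simp at hco
        have hne : ¬ (c = o) := fun h => hco h.symm
        simp [List.flatMap_cons, hne]

theorem rep_one (s : List Char) (o : Char) (new : List Char) :
    PySem.Chars.replace s [o] new = s.flatMap (fun c => if c = o then new else [c]) := by
  rw [PySem.Chars.replace]
  simp only [List.isEmpty_cons]
  exact rep_go_one o new s s.length [] (le_refl _)

-- replace "=0" on a string without '=' is the identity; a trailing "=0" is stripped
theorem rep_eq0_go_id : ∀ (l : List Char) (fuel : Nat) (acc : List Char), l.length ≤ fuel →
    '=' ∉ l → PySem.Chars.replace.go ['=', '0'] [] fuel l acc = acc.reverse ++ l := by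
  intro l
  induction l with
  | nil => intro fuel acc _ _; cases fuel <;> simp [PySem.Chars.replace.go]
  | cons c t ih =>
    intro fuel acc hf hm
    cases fuel with
    | zero => simp at hf
    | succ f =>
      rw [PySem.Chars.replace.go]
      have hc : ('=' == c) = false := by
        simp only [List.mem_cons, not_or] at hm
        exact beq_eq_false_iff_ne.mpr hm.1
      rw [if_neg (by simp [List.isPrefixOf, hc])]
      rw [ih f (c :: acc) (by simp at hf ⊢; omega) (by simp at hm ⊢; exact hm.2)]
      simp

theorem rep_eq0_suffix_go : ∀ (pre : List Char) (fuel : Nat) (acc : List Char),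
    (pre ++ ['=', '0']).length ≤ fuel → '=' ∉ pre →
    PySem.Chars.replace.go ['=', '0'] [] fuel (pre ++ ['=', '0']) acc = acc.reverse ++ pre := by
  intro pre
  induction pre with
  | nil =>
    intro fuel acc hf _
    cases fuel with
    | zero => simp at hf
    | succ f =>
      rw [show ([] : List Char) ++ ['=', '0'] = '=' :: ['0'] from rfl]
      rw [PySem.Chars.replace.go]
      rw [if_pos (by decide)]
      rw [show List.drop ['=', '0'].length ('=' :: ['0']) = ([] : List Char) from rfl]
      cases f <;> simp [PySem.Chars.replace.go]
  | cons c t ih =>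
    intro fuel acc hf hm
    cases fuel with
    | zero => simp at hf
    | succ f =>
      rw [show (c :: t) ++ ['=', '0'] = c :: (t ++ ['=', '0']) from rfl]
      rw [PySem.Chars.replace.go]
      have hc : ('=' == c) = false := by
        simp only [List.mem_cons, not_or] at hm
        exact beq_eq_false_iff_ne.mpr hm.1
      rw [if_neg (by simp [List.isPrefixOf, hc])]
      rw [ih f (c :: acc) (by simp at hf ⊢; omega) (by simp at hm ⊢; exact hm.2)]
      simp

theorem rep_eq0_id (s : List Char) (h : '=' ∉ s) : PySem.Chars.replace s ['=', '0'] [] = s := by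
  rw [PySem.Chars.replace]
  simp only [List.isEmpty_cons]
  simpa using rep_eq0_go_id s s.length [] (le_refl _) h

theorem rep_eq0_suffix (pre : List Char) (h : '=' ∉ pre) :
    PySem.Chars.replace (pre ++ ['=', '0']) ['=', '0'] [] = pre := by
  rw [PySem.Chars.replace]
  simp only [List.isEmpty_cons]
  simpa using rep_eq0_suffix_go pre (pre ++ ['=', '0']).length [] (le_refl _) h

-- the two deletion replaces are the filter used by Pre_
theorem clean_filter (s : List Char) :
    PySem.Chars.replace (PySem.Chars.replace s [' '] []) ['*'] [] =
      s.filter (fun c => !(c == ' ' || c == '*')) := by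
  rw [rep_one, rep_one]
  induction s with
  | nil => simp
  | cons c t ih =>
    simp only [List.flatMap_cons, List.filter_cons, List.flatMap_append, ih]
    by_cases h1 : c = ' '
    · simp [h1]
    · by_cases h2 : c = '*' <;> simp [h1, h2]

-- split₀ machinery
theorem sgo_token (t : List Char) (r cur : List Char) (acc : List (List Char))
    (h : ∀ c ∈ t, PySem.Chars.isspace c = false) :
    PySem.Chars.split₀.go (t ++ r) cur acc = PySem.Chars.split₀.go r (t.reverse ++ cur) acc := by
  induction t generalizing cur with
  | nil => simp
  | cons c t ih =>
    rw [List.cons_append, PySem.Chars.split₀.go]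
    rw [if_neg (by simp [h c (by simp)])]
    rw [ih _ (fun c hc => h c (by simp [hc]))]
    simp

theorem sgo_space (r cur : List Char) (acc : List (List Char)) (h : cur ≠ []) :
    PySem.Chars.split₀.go (' ' :: r) cur acc = PySem.Chars.split₀.go r [] (cur.reverse :: acc) := by
  rw [PySem.Chars.split₀.go]
  rw [if_pos (by decide)]
  rw [if_neg (by simpa using h)]

theorem sgo_nil (cur : List Char) (acc : List (List Char)) (h : cur ≠ []) :
    PySem.Chars.split₀.go [] cur acc = acc.reverse ++ [cur.reverse] := by
  rw [PySem.Chars.split₀.go]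
  rw [if_neg (by simpa using h)]
  simp

theorem sgo_render (ts : List (Bool × List Char)) :
    ∀ (cur : List Char) (acc : List (List Char)), cur ≠ [] →
      (∀ p ∈ ts, p.2 ≠ [] ∧ ∀ c ∈ p.2, PySem.Chars.isspace c = false) →
      PySem.Chars.split₀.go (renderTail ts) cur acc =
        acc.reverse ++ cur.reverse :: ts.map tokenOf := by
  induction ts with
  | nil => intro cur acc h _; simp [renderTail, sgo_nil cur acc h]
  | cons p rest ih =>
    intro cur acc h hall
    have hp := hall p (by simp)
    have htok : ∀ c ∈ tokenOf p, PySem.Chars.isspace c = false := by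
      intro c hc
      simp only [tokenOf] at hc
      rcases List.mem_append.mp hc with hc | hc
      · have : c = '-' := by by_cases hb : p.1 <;> simp [hb] at hc; exact hc
        subst this; decide
      · exact hp.2 c hc
    have htokne : tokenOf p ≠ [] := by
      simp only [tokenOf]
      intro hcontra
      exact hp.1 (List.append_eq_nil_iff.mp hcontra).2
    rw [renderTail, List.flatMap_cons, List.cons_append, sgo_space _ _ _ h]
    rw [sgo_token (tokenOf p) _ _ _ htok]
    rw [show (renderTail rest) = rest.flatMap (fun p => ' ' :: tokenOf p) from rfl] at *
    rw [ih ((tokenOf p).reverse ++ []) _ (by simpa using htokne) (fun q hq => hall q (by simp [hq]))]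
    simp

theorem flatMap_gSub_aux : ∀ (n : Nat) (cs : List Char), cs.length ≤ n →
    cs.flatMap gSub = cs.takeWhile notSign ++ renderTail (tailTerms cs) := by
  intro n
  induction n with
  | zero => intro cs h; simp at h; simp [h, tailTerms, renderTail]
  | succ n ih =>
    intro cs hlen
    have hsplit := (List.takeWhile_append_dropWhile (p := notSign) (l := cs)).symm
    rw [hsplit]
    rw [List.flatMap_append]
    have hTake : (cs.takeWhile notSign).flatMap gSub = cs.takeWhile notSign := by
      have hid : ∀ c ∈ cs.takeWhile notSign, gSub c = [c] := by
        intro c hc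
        have := List.mem_takeWhile_imp hc
        simp [notSign] at this
        simp [gSub, this.1, this.2]
      calc (cs.takeWhile notSign).flatMap gSub
          = (cs.takeWhile notSign).flatMap (fun c => [c]) := List.flatMap_congr (by intro c hc; exact hid c hc)
        _ = cs.takeWhile notSign := by simp
    rw [hTake]
    rw [List.takeWhile_append_dropWhile]
    congr 1
    cases hdw : cs.dropWhile notSign with
    | nil => simp [tailTerms, hdw, renderTail]
    | cons c r =>
      have hns : notSign c = false := by
        have := List.head?_dropWhile_not notSign cs
        rw [hdw] at this
        simpa using this
      have hr : r.length ≤ n := by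
        have h1 : (cs.dropWhile notSign).length ≤ cs.length := List.length_dropWhile_le _ _
        rw [hdw] at h1; simp at h1; omega
      rw [List.flatMap_cons]
      rw [ih r hr]
      simp only [tailTerms, hdw]
      rw [splitCores_eq]
      simp only [renderTail, List.flatMap_cons, List.reverse_nil, List.nil_append]
      have hc2 : c = '+' ∨ c = '-' := by simp [notSign] at hns; tauto
      rcases hc2 with rfl | rfl
      · simp [gSub, tokenOf, tailTerms]
      · simp [gSub, tokenOf, tailTerms]

-- splitOn with the single-character separator 'x'
theorem spgo_noX : ∀ (l : List Char) (fuel : Nat) (cur : List Char) (acc : List (List Char)),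
    l.length ≤ fuel → 'x' ∉ l →
    PySem.Chars.splitOn.go ['x'] fuel l cur acc = acc.reverse ++ [cur.reverse ++ l] := by
  intro l
  induction l with
  | nil => intro fuel cur acc _ _; cases fuel <;> simp [PySem.Chars.splitOn.go]
  | cons c t ih =>
    intro fuel cur acc hf hm
    cases fuel with
    | zero => simp at hf
    | succ f =>
      rw [PySem.Chars.splitOn.go]
      have hc : ('x' == c) = false := by
        simp only [List.mem_cons, not_or] at hm
        exact beq_eq_false_iff_ne.mpr hm.1
      rw [if_neg (by simp [List.isPrefixOf, hc])]
      rw [ih f (c :: cur) acc (by simp at hf ⊢; omega) (by simp at hm ⊢; exact hm.2)]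
      simp

theorem spgo_oneX : ∀ (a : List Char) (b : List Char) (fuel : Nat) (cur : List Char) (acc : List (List Char)),
    (a ++ 'x' :: b).length ≤ fuel → 'x' ∉ a → 'x' ∉ b →
    PySem.Chars.splitOn.go ['x'] fuel (a ++ 'x' :: b) cur acc = acc.reverse ++ [cur.reverse ++ a, b] := by
  intro a
  induction a with
  | nil =>
    intro b fuel cur acc hf _ hb
    cases fuel with
    | zero => simp at hf
    | succ f =>
      rw [List.nil_append, PySem.Chars.splitOn.go]
      rw [if_pos (by simp [List.isPrefixOf])]
      rw [show List.drop ['x'].length ('x' :: b) = b from rfl]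
      rw [spgo_noX b f [] (cur.reverse :: acc) (by simp at hf ⊢; omega) hb]
      simp
  | cons c t ih =>
    intro b fuel cur acc hf hm hb
    cases fuel with
    | zero => simp at hf
    | succ f =>
      rw [List.cons_append, PySem.Chars.splitOn.go]
      have hc : ('x' == c) = false := by
        simp only [List.mem_cons, not_or] at hm
        exact beq_eq_false_iff_ne.mpr hm.1
      rw [if_neg (by simp [List.isPrefixOf, hc])]
      rw [ih b f (c :: cur) acc (by simp at hf ⊢; omega) (by simp at hm ⊢; exact hm.2) hb]
      simp

theorem splitOn_one_x (a b : List Char) (ha : 'x' ∉ a) (hb : 'x' ∉ b) :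
    PySem.Chars.splitOn (a ++ 'x' :: b) ['x'] = [a, b] := by
  rw [PySem.Chars.splitOn]
  simpa using spgo_oneX a b ((a ++ 'x' :: b).length + 1) [] [] (by omega) ha hb

-- per-core facts
theorem coreTermOK_struct {core : List Char} (h : coreTermOK core = true) :
    ∃ ds es, core = ds ++ 'x' :: es ∧ (∀ c ∈ ds, PySem.Chars.isdigit c = true) ∧
      (∀ c ∈ es, PySem.Chars.isdigit c = true) ∧ core.takeWhile PySem.Chars.isdigit = ds := by
  unfold coreTermOK at h
  rw [drop_takeWhile_length] at h
  cases hdw : core.dropWhile PySem.Chars.isdigit with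
  | nil => rw [hdw] at h; simp at h
  | cons c es =>
    rw [hdw] at h
    split at h
    · next heq =>
      rename_i es2
      injection heq with h1 h2
      subst h1
      subst h2
      refine ⟨core.takeWhile PySem.Chars.isdigit, es, ?_, ?_, ?_, rfl⟩
      · conv_lhs => rw [← List.takeWhile_append_dropWhile (p := PySem.Chars.isdigit) (l := core)]
        rw [hdw]
      · exact fun c hc => List.mem_takeWhile_imp hc
      · simpa using h
    · simp at h

theorem char_ok {c : Char} (hc : PySem.Chars.isdigit c = true ∨ c = 'x') :
    PySem.Chars.isspace c = false ∧ notSign c = true := by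
  rcases hc with hc | rfl
  · refine ⟨digit_not_space hc, ?_⟩
    have h1 := digit_ne '+' (by decide) hc
    have h2 := digit_ne '-' (by decide) hc
    simp [notSign, h1, h2]
  · exact ⟨by decide, by decide⟩

theorem wf_core_mem {core : List Char} (h : coreLastOK core = true) :
    core ≠ [] ∧ ∀ c ∈ core, PySem.Chars.isdigit c = true ∨ c = 'x' := by
  unfold coreLastOK at h
  rcases Bool.or_eq_true_iff.mp h with h | h
  · obtain ⟨ds, es, rfl, hds, hes, _⟩ := coreTermOK_struct h
    refine ⟨by simp, ?_⟩
    intro c hc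
    rcases List.mem_append.mp hc with hc | hc
    · exact Or.inl (hds c hc)
    · rcases List.mem_cons.mp hc with rfl | hc
      · exact Or.inr rfl
      · exact Or.inl (hes c hc)
  · unfold PySem.Chars.strIsdigit at h
    simp only [Bool.and_eq_true, List.all_eq_true] at h
    exact ⟨by simpa using h.1, fun c hc => Or.inl (h.2 c hc)⟩

theorem wf_core_chars {core : List Char} (h : coreLastOK core = true) :
    core ≠ [] ∧ (∀ c ∈ core, PySem.Chars.isspace c = false) ∧ (∀ c ∈ core, notSign c = true) := by
  obtain ⟨hne, hmem⟩ := wf_core_mem h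
  exact ⟨hne, fun c hc => (char_ok (hmem c hc)).1, fun c hc => (char_ok (hmem c hc)).2⟩

-- small string-shape helpers for the mangling lemmas
theorem flatMap_rep_id (l : List Char) (o : Char) (X : List Char) (h : o ∉ l) :
    l.flatMap (fun c => if c = o then X else [c]) = l := by
  induction l with
  | nil => simp
  | cons c t ih =>
    simp only [List.mem_cons, not_or] at h
    have hne : ¬ (c = o) := fun hh => h.1 hh.symm
    simp [List.flatMap_cons, hne, ih h.2]

theorem rep_decomp (A es : List Char) (o : Char) (X : List Char) (hA : o ∉ A) (hes : o ∉ es) :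
    PySem.Chars.replace (A ++ o :: es) [o] X = A ++ (X ++ es) := by
  rw [rep_one, List.flatMap_append, List.flatMap_cons,
    flatMap_rep_id _ _ _ hA, flatMap_rep_id _ _ _ hes]
  simp

theorem sw_one (c : Char) (t : List Char) (b : Char) :
    PySem.Chars.startswith (c :: t) [b] = (b == c) := by
  simp [PySem.Chars.startswith, List.isPrefixOf]

theorem sw_two (c : Char) (t : List Char) (b1 b2 : Char) :
    PySem.Chars.startswith (c :: t) [b1, b2] = ((b1 == c) && PySem.Chars.startswith t [b2]) := by
  simp [PySem.Chars.startswith, List.isPrefixOf]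

theorem ew_concat (a : List Char) (e b : Char) : PySem.Chars.endswith (a ++ [e]) [b] = (b == e) := by
  by_cases h : b = e
  · subst h
    simp only [beq_self_eq_true]
    rw [PySem.Chars.endswith_iff]
    exact ⟨a, rfl⟩
  · rw [beq_eq_false_iff_ne.mpr h, ← Bool.not_eq_true, PySem.Chars.endswith_iff]
    rintro ⟨u, hu⟩
    have := congrArg List.getLast? hu
    simp at this
    exact h this

theorem digit_ne_x {c : Char} (h : PySem.Chars.isdigit c = true) : ¬ (c = 'x') :=
  digit_ne 'x' (by decide) h

theorem x_not_mem {l : List Char} (h : ∀ c ∈ l, PySem.Chars.isdigit c = true) : 'x' ∉ l :=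
  fun hx => digit_ne_x (h 'x' hx) rfl

theorem fOf_pair (a b : List Char) :
    fOf [a, b] = ((PySem.Int.ofChars? a).getD 0, (PySem.Int.ofChars? b).getD 0) := by
  simp [fOf, pysem]

theorem pairOf_term (p : Bool × List Char) (ds es : List Char) (hcore : p.2 = ds ++ 'x' :: es)
    (htw : p.2.takeWhile PySem.Chars.isdigit = ds) :
    pairOf p = ((PySem.Int.ofChars? ((if p.1 then ['-'] else []) ++ (if ds.isEmpty then ['1'] else ds))).getD 0,
      if es.isEmpty then 1 else (PySem.Int.ofChars? es).getD 0) := by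
  unfold pairOf
  rw [htw]
  conv_lhs => rw [hcore]
  simp [List.drop_left]

theorem pairOf_const (p : Bool × List Char) (hd : PySem.Chars.strIsdigit p.2 = true) :
    pairOf p = ((PySem.Int.ofChars? ((if p.1 then ['-'] else []) ++ p.2)).getD 0, 0) := by
  unfold PySem.Chars.strIsdigit at hd
  simp only [Bool.and_eq_true, List.all_eq_true] at hd
  have htw : p.2.takeWhile PySem.Chars.isdigit = p.2 :=
    List.takeWhile_eq_self_iff.mpr (fun c hc => hd.2 c hc)
  unfold pairOf
  rw [htw]
  simp [List.drop_length]

theorem mangle_term (p : Bool × List Char) (h : coreTermOK p.2 = true) :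
    fOf (mangleA (tokenOf p)) = pairOf p := by
  obtain ⟨ds, es, hcore, hds, hes, htw⟩ := coreTermOK_struct h
  have hxds : 'x' ∉ ds := x_not_mem hds
  have hxes : 'x' ∉ es := x_not_mem hes
  rw [pairOf_term p ds es hcore htw]
  have hsign : 'x' ∉ (if p.1 then ['-'] else ([] : List Char)) := by
    by_cases hb : p.1 <;> simp [hb]
  have hxA : 'x' ∉ (if p.1 then ['-'] else ([] : List Char)) ++ ds := by
    simp only [List.mem_append, not_or]; exact ⟨hsign, hxds⟩
  have htok : tokenOf p = ((if p.1 then ['-'] else []) ++ ds) ++ 'x' :: es := by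
    simp [tokenOf, hcore]
  -- compute the three branch conditions
  have hsw : (PySem.Chars.startswith (tokenOf p) ['x'] || PySem.Chars.startswith (tokenOf p) ['-', 'x'])
      = ds.isEmpty := by
    cases hd : ds with
    | nil =>
      subst hd
      cases hb : p.1 <;> simp [htok, hb, List.nil_append, sw_one, sw_two]
    | cons d t =>
      have hd1 := digit_ne_x (hds d (by simp [hd]))
      have hd2 := digit_ne (c := d) '-' (by decide) (hds d (by simp [hd]))
      subst hd
      cases hb : p.1 <;>
        simp [htok, hb, List.cons_append, sw_one, sw_two,
          beq_eq_false_iff_ne.mpr (fun hh => hd1 hh.symm),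
          beq_eq_false_iff_ne.mpr (fun hh => hd2 hh.symm)]
  have hew : PySem.Chars.endswith (tokenOf p) ['x'] = es.isEmpty := by
    rcases List.eq_nil_or_concat es with rfl | ⟨es0, e, rfl⟩
    · rw [show tokenOf p = ((if p.1 then ['-'] else []) ++ ds) ++ ['x'] by simp [htok]]
      rw [ew_concat]
      simp
    · rw [show tokenOf p = ((if p.1 then ['-'] else []) ++ ds ++ 'x' :: es0) ++ [e] by simp [htok]]
      rw [ew_concat]
      have := digit_ne_x (hes e (by simp))
      simp [beq_eq_false_iff_ne.mpr (fun hh => this hh.symm)]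
  unfold mangleA
  rw [hsw, hew, htok]
  cases hd : ds.isEmpty <;> cases he : es.isEmpty
  · -- ds ≠ [], es ≠ []
    rw [if_neg (by simp), if_neg (by simp), if_neg (by simp)]
    rw [splitOn_one_x _ _ hxA hxes, fOf_pair]
    simp
  · -- ds ≠ [], es = []
    have he' : es = [] := by simpa using he
    subst he'
    rw [if_neg (by simp), if_pos (by simp)]
    rw [rep_decomp _ _ _ _ hxA (by simp), List.append_nil]
    rw [splitOn_one_x _ _ hxA (by decide), fOf_pair]
    simp only [Prod.mk.injEq, reduceIte]
    exact ⟨by first | rfl | trivial, by decide⟩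
  · -- ds = [], es ≠ []
    have hd' : ds = [] := by simpa using hd
    subst hd'
    rw [if_neg (by simp), if_neg (by simp), if_pos (by simp)]
    rw [List.append_nil]
    rw [rep_decomp _ _ _ _ hsign hxes]
    rw [show ((['1', 'x'] : List Char) ++ es) = ['1'] ++ ('x' :: es) from rfl, ← List.append_assoc]
    rw [splitOn_one_x _ _ (by simp only [List.mem_append, not_or]; exact ⟨hsign, by decide⟩) hxes, fOf_pair]
    simp
  · -- ds = [], es = []
    have hd' : ds = [] := by simpa using hd
    have he' : es = [] := by simpa using he
    subst hd'
    subst he'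
    rw [if_pos (by simp)]
    rw [List.append_nil]
    rw [rep_decomp _ _ _ _ hsign (by simp), List.append_nil]
    rw [show (['1', 'x', '1'] : List Char) = ['1'] ++ ('x' :: ['1']) from rfl, ← List.append_assoc]
    rw [splitOn_one_x _ _ (by simp only [List.mem_append, not_or]; exact ⟨hsign, by decide⟩) (by decide), fOf_pair]
    simp only [Prod.mk.injEq, reduceIte]
    exact ⟨by first | rfl | trivial, by decide⟩

-- the digit-counting loop in fixLastA
theorem countFold (l : List Char) (full : List Char) (pre : Nat)
    (hget : ∀ k < l.length, full.getD (pre + k) '?' = l.getD k '?') :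
    ∀ (t : Int), (List.range l.length).foldl
        (fun t k => if PySem.Chars.isdigit (full.getD (pre + k) '?') then t + 1 else t) t
      = t + l.countP PySem.Chars.isdigit := by
  induction l using List.reverseRecOn with
  | nil => intro t; simp
  | append_singleton l0 c ih =>
    intro t
    have hlen : (l0 ++ [c]).length = l0.length + 1 := by simp
    rw [hlen, List.range_succ, List.foldl_append]
    rw [ih (fun k hk => by
      rw [hget k (by simp; omega)]
      rw [List.getD_append _ _ _ _ hk])]
    have hstep : full.getD (pre + l0.length) '?' = c := by
      rw [hget l0.length (by simp)]
      simp [List.getD_append_right, List.getD]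
    simp only [List.foldl_cons, List.foldl_nil, List.countP_append]
    rw [hstep]
    by_cases hc : PySem.Chars.isdigit c <;> simp [hc, List.countP_cons] <;> omega

theorem temp_eq_countP (core : List Char) :
    (PySem.List.pyRange 1 (('-' :: core).length : Int) 1).foldl
      (fun temp i => if PySem.Chars.isdigit (PySem.List.pyGetD ('-' :: core) i '?') then temp + 1 else temp) (0 : Int)
    = core.countP PySem.Chars.isdigit := by
  rw [PySem.List.pyRange_one]
  have hlen : ((('-' :: core).length : Int) - 1).toNat = core.length := by simp
  rw [hlen, List.foldl_map]
  have hcast : ∀ k : Nat, ((1 : Int) + (k : Int)) = ((1 + k : Nat) : Int) := by intro k; push_cast; ring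
  have hfun : (fun (temp : Int) (k : Nat) =>
        if PySem.Chars.isdigit (PySem.List.pyGetD ('-' :: core) (1 + (k : Int)) '?') then temp + 1 else temp)
      = (fun (temp : Int) (k : Nat) =>
        if PySem.Chars.isdigit (('-' :: core).getD (1 + k) '?') then temp + 1 else temp) := by
    funext temp k
    rw [hcast k, PySem.List.pyGetD_natCast]
  rw [hfun]
  have := countFold core ('-' :: core) 1 (fun k _ => by simp [Nat.add_comm 1 k]) 0
  rw [this]
  simp

theorem fix_term (p : Bool × List Char) (h : coreTermOK p.2 = true) :
    fixLastA (tokenOf p) = tokenOf p := by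
  obtain ⟨ds, es, hcore, hds, hes, htw⟩ := coreTermOK_struct h
  have hxmem : 'x' ∈ p.2 := by rw [hcore]; simp
  have hnall : ¬ (∀ c ∈ p.2, PySem.Chars.isdigit c = true) := by
    intro hall
    exact digit_ne_x (hall 'x' hxmem) rfl
  have hcount : p.2.countP PySem.Chars.isdigit ≠ p.2.length := by
    intro heq
    exact hnall (List.countP_eq_length.mp heq)
  cases hb : p.1 with
  | false =>
    have htok : tokenOf p = p.2 := by simp [tokenOf, hb]
    have h1 : PySem.Chars.startswith p.2 ['-'] = false := by
      cases hdd : ds with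
      | nil =>
        rw [hcore]
        subst hdd
        simp [sw_one]
      | cons d t =>
        have hd2 := digit_ne (c := d) '-' (by decide) (hds d (by simp [hdd]))
        rw [hcore]
        subst hdd
        simp only [List.cons_append, sw_one]
        simp only [beq_eq_false_iff_ne, ne_eq]
        exact fun hh => hd2 hh.symm
    have h2 : PySem.Chars.strIsdigit p.2 = false := by
      rw [← Bool.not_eq_true]
      unfold PySem.Chars.strIsdigit
      simp only [Bool.and_eq_true, List.all_eq_true, not_and]
      intro _ hall
      exact absurd (hall 'x' hxmem) (by decide)
    rw [htok]
    simp [fixLastA, h1, h2]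
  | true =>
    have htok : tokenOf p = '-' :: p.2 := by simp [tokenOf, hb]
    rw [htok]
    unfold fixLastA
    rw [if_pos (by simp [sw_one])]
    rw [temp_eq_countP p.2]
    rw [if_neg ?_]
    refine fun heq => hcount ?_
    simp only [List.length_cons] at heq
    push_cast at heq
    omega

theorem fix_const (p : Bool × List Char) (hd : PySem.Chars.strIsdigit p.2 = true) :
    fixLastA (tokenOf p) = tokenOf p ++ ['x', '0'] := by
  have hdig : ∀ c ∈ p.2, PySem.Chars.isdigit c = true := by
    unfold PySem.Chars.strIsdigit at hd
    simp only [Bool.and_eq_true, List.all_eq_true] at hd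
    exact fun c hc => hd.2 c hc
  have hne : p.2 ≠ [] := by
    unfold PySem.Chars.strIsdigit at hd
    simp only [Bool.and_eq_true] at hd
    simpa using hd.1
  cases hb : p.1 with
  | false =>
    have htok : tokenOf p = p.2 := by simp [tokenOf, hb]
    have h1 : PySem.Chars.startswith p.2 ['-'] = false := by
      cases hcs : p.2 with
      | nil => exact (hne hcs).elim
      | cons d t =>
        have hd2 := digit_ne (c := d) '-' (by decide) (hdig d (by simp [hcs]))
        simp only [sw_one]
        simp only [beq_eq_false_iff_ne, ne_eq]
        exact fun hh => hd2 hh.symm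
    rw [htok]
    simp [fixLastA, h1, hd]
  | true =>
    have htok : tokenOf p = '-' :: p.2 := by simp [tokenOf, hb]
    rw [htok]
    unfold fixLastA
    rw [if_pos (by simp [sw_one])]
    rw [temp_eq_countP p.2]
    rw [if_pos (by rw [List.countP_eq_length.mpr hdig]; simp)]

theorem fix_const_mangle (p : Bool × List Char) (hd : PySem.Chars.strIsdigit p.2 = true) :
    fOf (mangleA (fixLastA (tokenOf p))) = pairOf p := by
  have hdig : ∀ c ∈ p.2, PySem.Chars.isdigit c = true := by
    unfold PySem.Chars.strIsdigit at hd
    simp only [Bool.and_eq_true, List.all_eq_true] at hd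
    exact fun c hc => hd.2 c hc
  have hne : p.2 ≠ [] := by
    unfold PySem.Chars.strIsdigit at hd
    simp only [Bool.and_eq_true] at hd
    simpa using hd.1
  have hxcore : 'x' ∉ p.2 := x_not_mem hdig
  have hsign : 'x' ∉ (if p.1 then ['-'] else ([] : List Char)) := by
    by_cases hb : p.1 <;> simp [hb]
  have hxA : 'x' ∉ (if p.1 then ['-'] else ([] : List Char)) ++ p.2 := by
    simp only [List.mem_append, not_or]; exact ⟨hsign, hxcore⟩
  rw [fix_const p hd, pairOf_const p hd]
  have htok2 : tokenOf p ++ ['x', '0']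
      = ((if p.1 then ['-'] else []) ++ p.2) ++ 'x' :: ['0'] := by
    simp [tokenOf]
  rw [htok2]
  -- head character of the patched token is '-' or a digit, its last is '0'
  unfold mangleA
  have hsw1 : PySem.Chars.startswith (((if p.1 then ['-'] else []) ++ p.2) ++ 'x' :: ['0']) ['x'] = false := by
    cases hb : p.1 with
    | false =>
      cases hcs : p.2 with
      | nil => exact (hne hcs).elim
      | cons d t =>
        have hthis := digit_ne_x (hdig d (by simp [hcs]))
        rw [show ((if false = true then ['-'] else ([] : List Char)) ++ (d :: t)) ++ 'x' :: ['0']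
            = d :: (t ++ 'x' :: ['0']) from by simp]
        rw [sw_one]
        exact beq_eq_false_iff_ne.mpr (fun hh => hthis hh.symm)
    | true =>
      rw [show ((if true = true then ['-'] else ([] : List Char)) ++ p.2) ++ 'x' :: ['0']
          = '-' :: (p.2 ++ 'x' :: ['0']) from by simp]
      rw [sw_one]
      decide
  have hsw2 : PySem.Chars.startswith (((if p.1 then ['-'] else []) ++ p.2) ++ 'x' :: ['0']) ['-', 'x'] = false := by
    cases hb : p.1 with
    | false =>
      cases hcs : p.2 with
      | nil => exact (hne hcs).elim
      | cons d t =>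
        have hthis := digit_ne (c := d) '-' (by decide) (hdig d (by simp [hcs]))
        rw [show ((if false = true then ['-'] else ([] : List Char)) ++ (d :: t)) ++ 'x' :: ['0']
            = d :: (t ++ 'x' :: ['0']) from by simp]
        rw [sw_two]
        rw [show (('-' : Char) == d) = false from beq_eq_false_iff_ne.mpr (fun hh => hthis hh.symm)]
        simp
    | true =>
      cases hcs : p.2 with
      | nil => exact (hne hcs).elim
      | cons d t =>
        have hthis := digit_ne_x (hdig d (by simp [hcs]))
        rw [show ((if true = true then ['-'] else ([] : List Char)) ++ (d :: t)) ++ 'x' :: ['0']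
            = '-' :: (d :: (t ++ 'x' :: ['0'])) from by simp]
        rw [sw_two, sw_one]
        rw [show (('x' : Char) == d) = false from beq_eq_false_iff_ne.mpr (fun hh => hthis hh.symm)]
        simp
  have hew : PySem.Chars.endswith (((if p.1 then ['-'] else []) ++ p.2) ++ 'x' :: ['0']) ['x'] = false := by
    rw [show ((if p.1 then ['-'] else ([] : List Char)) ++ p.2) ++ 'x' :: ['0']
        = (((if p.1 then ['-'] else ([] : List Char)) ++ p.2) ++ ['x']) ++ ['0'] by simp]
    rw [ew_concat]
    decide
  rw [hsw1, hsw2, hew]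
  simp only [Bool.or_self, Bool.false_and, Bool.false_eq_true, if_false]
  rw [splitOn_one_x _ _ hxA (by decide), fOf_pair]
  simp only [Prod.mk.injEq]
  exact ⟨by first | rfl | trivial, by decide⟩

-- wfTerms bookkeeping
theorem parseTermsB_nil (fuel : Nat) : parseTermsB fuel [] = [] := by
  cases fuel <;> rfl

theorem getLast?_cons_ne {α : Type} (c : α) (ts : List α) (h : ts ≠ []) :
    (c :: ts).getLast? = ts.getLast? := by
  cases ts with
  | nil => exact absurd rfl h
  | cons a t => simp [List.getLast?_cons_cons]

theorem wf_all {ts : List (Bool × List Char)} (h : wfTerms ts = true) :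
    ∀ p ∈ ts, coreLastOK p.2 = true := by
  unfold wfTerms at h
  simp only [Bool.and_eq_true, List.all_eq_true] at h
  intro p hp
  have hne : ts ≠ [] := by rintro rfl; simp at hp
  rw [← List.dropLast_concat_getLast hne] at hp
  rcases List.mem_append.mp hp with hp | hp
  · have := h.1 p hp
    unfold coreLastOK
    simp [this]
  · simp at hp
    subst hp
    have hl := List.getLast?_eq_some_getLast hne
    rw [hl] at h
    exact h.2

theorem wf_head_term {p : Bool × List Char} {ts : List (Bool × List Char)}
    (h : wfTerms (p :: ts) = true) (hne : ts ≠ []) : coreTermOK p.2 = true := by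
  unfold wfTerms at h
  simp only [Bool.and_eq_true, List.all_eq_true] at h
  apply h.1
  rw [List.dropLast_cons_of_ne_nil hne]
  simp

theorem wf_tail {p : Bool × List Char} {ts : List (Bool × List Char)}
    (h : wfTerms (p :: ts) = true) (hne : ts ≠ []) : wfTerms ts = true := by
  unfold wfTerms at *
  simp only [Bool.and_eq_true, List.all_eq_true] at *
  constructor
  · intro q hq
    apply h.1
    rw [List.dropLast_cons_of_ne_nil hne]
    exact List.mem_cons_of_mem _ hq
  · rw [getLast?_cons_ne _ _ hne] at h
    exact h.2

theorem parseAll_cons_sign (c : Char) (r : List Char) (h : notSign c = false) :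
    parseAll (c :: r) = splitCores [] (c == '-') r := by
  have hc : c = '+' ∨ c = '-' := by
    simp [notSign] at h
    tauto
  rcases hc with rfl | rfl <;> rfl

theorem parseAll_cons_nosign (c : Char) (r : List Char) (h : notSign c = true) :
    parseAll (c :: r) = splitCores [] false (c :: r) := by
  have h1 : ¬ (c = '+') := by simp [notSign] at h; exact fun hh => h.1 hh
  have h2 : ¬ (c = '-') := by simp [notSign] at h; exact fun hh => h.2 hh
  unfold parseAll
  split
  · next heq => injection heq with hc _; exact absurd hc h1
  · next heq => injection heq with hc _; exact absurd hc h2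
  · rfl

-- the B-side scanner computes pairOf over parseAll
theorem splitCores_ne_nil (cur : List Char) (neg : Bool) (cs : List Char) :
    splitCores cur neg cs ≠ [] := by
  rw [splitCores_eq]
  simp

theorem sign_not_digit {c : Char} (h : notSign c = false) : PySem.Chars.isdigit c = false := by
  have hc : c = '+' ∨ c = '-' := by simp [notSign] at h; tauto
  rcases hc with rfl | rfl <;> decide

theorem scan_core (f : Nat)
    (ih : ∀ cs, cs.length < f → wfTerms (parseAll cs) = true →
      parseTermsB f cs = (parseAll cs).map pairOf)
    (neg : Bool) (l1 : List Char) (hlen : l1.length ≤ f)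
    (hwf : wfTerms (splitCores [] neg l1) = true) :
    (match l1.drop (l1.takeWhile PySem.Chars.isdigit).length with
     | 'x' :: r2 =>
       ((PySem.Int.ofChars? ((if neg then ['-'] else []) ++
           (if (l1.takeWhile PySem.Chars.isdigit).isEmpty then ['1']
            else l1.takeWhile PySem.Chars.isdigit))).getD 0,
         if (r2.takeWhile PySem.Chars.isdigit).isEmpty then 1
         else (PySem.Int.ofChars? (r2.takeWhile PySem.Chars.isdigit)).getD 0) ::
           parseTermsB f (r2.drop (r2.takeWhile PySem.Chars.isdigit).length)
     | r => ((PySem.Int.ofChars? ((if neg then ['-'] else []) ++ l1.takeWhile PySem.Chars.isdigit)).getD 0, 0) ::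
         parseTermsB f r)
    = (splitCores [] neg l1).map pairOf := by
  rw [splitCores_eq] at hwf ⊢
  simp only [List.reverse_nil, List.nil_append] at hwf ⊢
  have hlast : coreLastOK (l1.takeWhile notSign) = true :=
    wf_all hwf (neg, l1.takeWhile notSign) (by simp)
  have htne : l1.takeWhile notSign ≠ [] := (wf_core_chars hlast).1
  have hsplit : l1 = l1.takeWhile notSign ++ l1.dropWhile notSign :=
    (List.takeWhile_append_dropWhile).symm
  by_cases hterm : coreTermOK (l1.takeWhile notSign) = true
  · -- a proper term  ds ['x' es]
    obtain ⟨ds, es, hcore, hds, hes, htw⟩ := coreTermOK_struct hterm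
    have hl1 : l1 = ds ++ 'x' :: (es ++ l1.dropWhile notSign) := by
      conv_lhs => rw [hsplit, hcore]
      simp
    have htwd : l1.takeWhile PySem.Chars.isdigit = ds := by
      conv_lhs => rw [hl1]
      rw [List.takeWhile_append_of_pos hds]
      simp [List.takeWhile_cons, show PySem.Chars.isdigit 'x' = false from by decide]
    have hdrop : l1.drop (l1.takeWhile PySem.Chars.isdigit).length
        = 'x' :: (es ++ l1.dropWhile notSign) := by
      rw [htwd]
      conv_lhs => rw [hl1]
      exact List.drop_left
    rw [hdrop]
    simp only []
    have htwes : (es ++ l1.dropWhile notSign).takeWhile PySem.Chars.isdigit = es := by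
      rw [List.takeWhile_append_of_pos hes]
      cases hdw : l1.dropWhile notSign with
      | nil => simp
      | cons c2 r' =>
        have hns : notSign c2 = false := by
          have := List.head?_dropWhile_not notSign l1
          rw [hdw] at this
          simpa using this
        simp [List.takeWhile_cons, sign_not_digit hns]
    rw [htwes]
    have hdrop2 : (es ++ l1.dropWhile notSign).drop es.length = l1.dropWhile notSign :=
      List.drop_left
    rw [hdrop2]
    have hpair : pairOf (neg, l1.takeWhile notSign)
        = ((PySem.Int.ofChars? ((if neg then ['-'] else []) ++ (if ds.isEmpty then ['1'] else ds))).getD 0,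
            if es.isEmpty then 1 else (PySem.Int.ofChars? es).getD 0) :=
      pairOf_term (neg, l1.takeWhile notSign) ds es hcore htw
    cases hdw : l1.dropWhile notSign with
    | nil =>
      have htail : tailTerms l1 = [] := by simp [tailTerms, hdw]
      rw [htail, parseTermsB_nil]
      simp only [List.map_cons, List.map_nil, hpair, htwd]
    | cons c2 r' =>
      have hns : notSign c2 = false := by
        have := List.head?_dropWhile_not notSign l1
        rw [hdw] at this
        simpa using this
      have htail : tailTerms l1 = splitCores [] (c2 == '-') r' := by simp [tailTerms, hdw]
      have hlr : r'.length + 1 < f := by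
        have h1 := congrArg List.length hsplit
        rw [List.length_append] at h1
        rw [hdw] at h1
        have h2 : 1 ≤ (l1.takeWhile notSign).length := by
          cases hq : l1.takeWhile notSign with
          | nil => exact absurd hq htne
          | cons _ _ => simp
        simp at h1
        omega
      have hwf' : wfTerms (parseAll (c2 :: r')) = true := by
        rw [parseAll_cons_sign c2 r' hns, ← htail]
        exact wf_tail hwf (htail ▸ splitCores_ne_nil [] (c2 == '-') r')
      rw [htail]
      simp only [List.map_cons, htwd, hpair]
      have hih := ih (c2 :: r') (by simpa using hlr) hwf'
      rw [parseAll_cons_sign c2 r' hns] at hih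
      rw [hih]
  · -- a bare constant: only allowed in last position, so the tail is empty
    have hconst : PySem.Chars.strIsdigit (l1.takeWhile notSign) = true := by
      unfold coreLastOK at hlast
      rcases Bool.or_eq_true_iff.mp hlast with h | h
      · exact absurd h hterm
      · exact h
    have htail : tailTerms l1 = [] := by
      by_contra hne
      have : coreTermOK (l1.takeWhile notSign) = true :=
        wf_head_term hwf hne
      exact hterm this
    have hdwnil : l1.dropWhile notSign = [] := by
      cases hdw : l1.dropWhile notSign with
      | nil => rfl
      | cons c2 r' =>
        exact absurd (by simp [tailTerms, hdw] : tailTerms l1 = splitCores [] (c2 == '-') r')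
          (fun hh => splitCores_ne_nil [] (c2 == '-') r' (hh ▸ htail))
    have hl1t : l1 = l1.takeWhile notSign := by
      conv_lhs => rw [hsplit, hdwnil]
      simp
    have hdigall : ∀ c ∈ l1, PySem.Chars.isdigit c = true := by
      unfold PySem.Chars.strIsdigit at hconst
      simp only [Bool.and_eq_true, List.all_eq_true] at hconst
      intro c hc
      exact hconst.2 c (by rw [← hl1t]; exact hc)
    have htwd : l1.takeWhile PySem.Chars.isdigit = l1 :=
      List.takeWhile_eq_self_iff.mpr hdigall
    rw [htwd, List.drop_length]
    simp only []
    rw [htail, parseTermsB_nil]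
    have hpair := pairOf_const (neg, l1.takeWhile notSign) hconst
    simp only [List.map_cons, List.map_nil, hpair]
    rw [← hl1t]

theorem parseB_spec : ∀ (fuel : Nat) (cs : List Char), cs.length < fuel →
    wfTerms (parseAll cs) = true →
    parseTermsB fuel cs = (parseAll cs).map pairOf := by
  intro fuel
  induction fuel with
  | zero => intro cs h; omega
  | succ f ih =>
    intro cs hlen hwf
    cases cs with
    | nil => exact absurd hwf (by decide)
    | cons c rest =>
      by_cases hc : notSign c = true
      · -- no sign: the scanner works on c :: rest itself
        have h1 : ¬ (c = '+') := by simp [notSign] at hc; exact fun hh => hc.1 hh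
        have h2 : ¬ (c = '-') := by simp [notSign] at hc; exact fun hh => hc.2 hh
        rw [parseAll_cons_nosign c rest hc] at hwf ⊢
        show (let neg := c == '-'
              let l1 := if c == '+' || c == '-' then rest else c :: rest
              let ds := l1.takeWhile PySem.Chars.isdigit
              let sign : List Char := if neg then ['-'] else []
              match l1.drop ds.length with
              | 'x' :: r2 =>
                let pd := r2.takeWhile PySem.Chars.isdigit
                ((PySem.Int.ofChars? (sign ++ (if ds.isEmpty then ['1'] else ds))).getD 0,
                  if pd.isEmpty then 1 else (PySem.Int.ofChars? pd).getD 0) :: parseTermsB f (r2.drop pd.length)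
              | r => ((PySem.Int.ofChars? (sign ++ ds)).getD 0, 0) :: parseTermsB f r)
            = _
        simp only [beq_eq_false_iff_ne.mpr h1, beq_eq_false_iff_ne.mpr h2, Bool.or_self,
          Bool.false_eq_true, if_false, Bool.or_false]
        exact scan_core f ih false (c :: rest) (by simpa using hlen) hwf
      · -- a sign: it is consumed and the scanner works on rest
        simp only [Bool.not_eq_true] at hc
        rw [parseAll_cons_sign c rest hc] at hwf ⊢
        show (let neg := c == '-'
              let l1 := if c == '+' || c == '-' then rest else c :: rest
              let ds := l1.takeWhile PySem.Chars.isdigit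
              let sign : List Char := if neg then ['-'] else []
              match l1.drop ds.length with
              | 'x' :: r2 =>
                let pd := r2.takeWhile PySem.Chars.isdigit
                ((PySem.Int.ofChars? (sign ++ (if ds.isEmpty then ['1'] else ds))).getD 0,
                  if pd.isEmpty then 1 else (PySem.Int.ofChars? pd).getD 0) :: parseTermsB f (r2.drop pd.length)
              | r => ((PySem.Int.ofChars? (sign ++ ds)).getD 0, 0) :: parseTermsB f r)
            = _
        have hor : (c == '+' || c == '-') = true := by
          have : c = '+' ∨ c = '-' := by simp [notSign] at hc; tauto
          rcases this with rfl | rfl <;> simp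
        simp only [hor, if_true]
        exact scan_core f ih (c == '-') rest (by simp at hlen; omega) hwf

-- the A-side token list
theorem flatMap_compose (b : List Char) :
    (b.flatMap (fun c => if c = '+' then [' '] else [c])).flatMap
      (fun c => if c = '-' then [' ', '-'] else [c]) = b.flatMap gSub := by
  induction b with
  | nil => simp
  | cons c t ih =>
    simp only [List.flatMap_cons, List.flatMap_append, ih]
    congr 1
    by_cases h1 : c = '+'
    · simp [h1, gSub]
    · by_cases h2 : c = '-' <;> simp [h1, h2, gSub]

theorem sgo_space_nil (r : List Char) (acc : List (List Char)) :
    PySem.Chars.split₀.go (' ' :: r) [] acc = PySem.Chars.split₀.go r [] acc := by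
  rw [PySem.Chars.split₀.go]
  rw [if_pos (by decide)]
  rw [if_pos (by decide)]

theorem wf_token_conds {ts : List (Bool × List Char)} (h : ∀ p ∈ ts, coreLastOK p.2 = true) :
    ∀ p ∈ ts, p.2 ≠ [] ∧ ∀ c ∈ p.2, PySem.Chars.isspace c = false := by
  intro p hp
  obtain ⟨h1, h2, _⟩ := wf_core_chars (h p hp)
  exact ⟨h1, h2⟩

theorem tokens_spec (b : List Char) (hwf : wfTerms (parseAll b) = true) :
    PySem.Chars.split₀
      (PySem.Chars.replace (PySem.Chars.replace b ['+'] [' ']) ['-'] [' ', '-']) =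
      (parseAll b).map tokenOf := by
  rw [rep_one, rep_one, flatMap_compose, flatMap_gSub_aux b.length b le_rfl]
  cases b with
  | nil => exact absurd hwf (by decide)
  | cons c r =>
    by_cases hc : notSign c = true
    · -- no leading sign
      rw [parseAll_cons_nosign c r hc] at hwf ⊢
      rw [splitCores_eq] at hwf ⊢
      simp only [List.reverse_nil, List.nil_append] at hwf ⊢
      have htw : (c :: r).takeWhile notSign = c :: r.takeWhile notSign := by
        simp [List.takeWhile_cons, hc]
      have hall := wf_all hwf
      have hconds := wf_token_conds (fun p hp => hall p (List.mem_cons_of_mem _ hp))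
      have hhead := wf_core_chars (hall (false, List.takeWhile notSign (c :: r)) List.mem_cons_self)
      rw [PySem.Chars.split₀]
      rw [sgo_token _ _ _ _ (by
        intro ch hch
        exact hhead.2.1 ch hch)]
      rw [sgo_render _ _ _ (by
        simp only [List.append_nil, ne_eq, List.reverse_eq_nil_iff]
        exact hhead.1) hconds]
      simp [tokenOf]
    · -- leading sign
      simp only [Bool.not_eq_true] at hc
      rw [parseAll_cons_sign c r hc] at hwf ⊢
      rw [splitCores_eq] at hwf ⊢
      simp only [List.reverse_nil, List.nil_append] at hwf ⊢
      have htw : (c :: r).takeWhile notSign = [] := by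
        simp [List.takeWhile_cons, hc]
      have hdw : (c :: r).dropWhile notSign = c :: r := by
        simp [List.dropWhile_cons, hc]
      rw [htw]
      have htails : tailTerms (c :: r) = splitCores [] (c == '-') r := by
        simp [tailTerms, hdw]
      rw [htails, splitCores_eq]
      simp only [List.reverse_nil, List.nil_append]
      have hall := wf_all hwf
      have hhead := wf_core_chars (hall (c == '-', List.takeWhile notSign r) List.mem_cons_self)
      have hconds := wf_token_conds (fun p hp => hall p (List.mem_cons_of_mem _ hp))
      -- the rendered text starts with the separator of the first token
      rw [show renderTail ((c == '-', r.takeWhile notSign) :: tailTerms r)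
          = ' ' :: (tokenOf (c == '-', r.takeWhile notSign) ++ renderTail (tailTerms r)) from by
        simp [renderTail]]
      rw [PySem.Chars.split₀]
      rw [sgo_space_nil]
      have htokcond : ∀ ch ∈ tokenOf (c == '-', r.takeWhile notSign), PySem.Chars.isspace ch = false := by
        intro ch hch
        simp only [tokenOf] at hch
        rcases List.mem_append.mp hch with hch | hch
        · have : ch = '-' := by
            by_cases hb : (c == '-') = true <;> simp [hb] at hch
            exact hch
          subst this; decide
        · exact hhead.2.1 ch hch
      rw [sgo_token _ _ _ _ htokcond]
      rw [sgo_render _ _ _ (by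
        simp only [List.append_nil, ne_eq, List.reverse_eq_nil_iff]
        intro hcontra
        exact hhead.1 (List.append_eq_nil_iff.mp hcontra).2) hconds]
      simp

-- assembling the equivalence
theorem parseAll_cons (b : List Char) : ∃ p0 ts0, parseAll b = p0 :: ts0 := by
  cases b with
  | nil => exact ⟨(false, []), [], rfl⟩
  | cons c r =>
    by_cases hc : notSign c = true
    · rw [parseAll_cons_nosign c r hc, splitCores_eq]
      exact ⟨_, _, rfl⟩
    · rw [parseAll_cons_sign c r (by simpa using hc), splitCores_eq]
      exact ⟨_, _, rfl⟩

theorem parseAll_ne_nil (b : List Char) : parseAll b ≠ [] := by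
  obtain ⟨p0, ts0, h⟩ := parseAll_cons b
  rw [h]
  simp

theorem last_pair (p : Bool × List Char) (h : coreLastOK p.2 = true) :
    fOf (mangleA (fixLastA (tokenOf p))) = pairOf p := by
  unfold coreLastOK at h
  rcases Bool.or_eq_true_iff.mp h with h | h
  · rw [fix_term p h]
    exact mangle_term p h
  · exact fix_const_mangle p h

theorem fOf_nil : fOf ([] : List (List Char)) = ((0 : Int), (0 : Int)) := by decide

theorem main_core (s : String) (bb : List Char)
    (hchain : PySem.Chars.replace (PySem.Chars.replace (PySem.Chars.replace s.toList [' '] []) ['*'] []) ['=', '0'] [] = bb)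
    (hwf : wfTerms (parseAll bb) = true) :
    convert_equation_dict s = convert_equation_dict_alt s := by
  have hts : parseAll bb ≠ [] := parseAll_ne_nil bb
  have hsplitts : parseAll bb = (parseAll bb).dropLast ++ [(parseAll bb).getLast hts] :=
    (List.dropLast_concat_getLast hts).symm
  have hmap : (parseAll bb).map tokenOf
      = (parseAll bb).dropLast.map tokenOf ++ [tokenOf ((parseAll bb).getLast hts)] := by
    conv_lhs => rw [hsplitts]
    simp
  have hinit : ∀ p ∈ (parseAll bb).dropLast, coreTermOK p.2 = true := by
    have h := hwf
    unfold wfTerms at h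
    simp only [Bool.and_eq_true, List.all_eq_true] at h
    exact h.1
  have hlastok : coreLastOK ((parseAll bb).getLast hts).2 = true :=
    wf_all hwf _ (List.getLast_mem hts)
  -- the list of (coefficient, power) views of A's parts equals B's term list
  have hview :
      (((parseAll bb).dropLast.map tokenOf ++ [fixLastA (tokenOf ((parseAll bb).getLast hts))]).map mangleA).map fOf
        = (parseAll bb).map pairOf := by
    rw [List.map_append, List.map_append, List.map_map, List.map_map]
    conv_rhs => rw [hsplitts]
    rw [List.map_append]
    congr 1
    · apply List.map_congr_left
      intro p hp
      simp only [Function.comp_apply]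
      exact mangle_term p (hinit p hp)
    · simp only [List.map_cons, List.map_nil]
      rw [last_pair _ hlastok]
  have hB : parseTermsB (bb.length + 1) bb = (parseAll bb).map pairOf :=
    parseB_spec (bb.length + 1) bb (by omega) hwf
  obtain ⟨p0, ts0, hcons⟩ := parseAll_cons bb
  -- lengths agree
  have hlen1 : ((parseAll bb).dropLast.map tokenOf ++ [fixLastA (tokenOf ((parseAll bb).getLast hts))]).length
      = (parseAll bb).length := by
    have := congrArg List.length hsplitts
    simp at this ⊢
    omega
  -- pointwise equality of the int readings
  have hAt : ∀ j : Int,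
      (pvIntAt (((parseAll bb).dropLast.map tokenOf ++ [fixLastA (tokenOf ((parseAll bb).getLast hts))]).map mangleA) j 0,
       pvIntAt (((parseAll bb).dropLast.map tokenOf ++ [fixLastA (tokenOf ((parseAll bb).getLast hts))]).map mangleA) j 1)
      = PySem.List.pyGetD ((parseAll bb).map pairOf) j ((0 : Int), (0 : Int)) := by
    intro j
    calc (pvIntAt _ j 0, pvIntAt _ j 1)
        = fOf (PySem.List.pyGetD (((parseAll bb).dropLast.map tokenOf ++ [fixLastA (tokenOf ((parseAll bb).getLast hts))]).map mangleA) j []) := rfl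
      _ = PySem.List.pyGetD ((((parseAll bb).dropLast.map tokenOf ++ [fixLastA (tokenOf ((parseAll bb).getLast hts))]).map mangleA).map fOf) j (fOf []) :=
          (PySem.List.pyGetD_map fOf _ j []).symm
      _ = PySem.List.pyGetD ((parseAll bb).map pairOf) j ((0 : Int), (0 : Int)) := by
          rw [hview, fOf_nil]
  -- now unfold both ports and rewrite
  unfold convert_equation_dict convert_equation_dict_alt
  rw [hchain, tokens_spec bb hwf]
  simp only []
  rw [hB, hmap, List.getLast?_concat, List.dropLast_concat]
  simp only []
  have hmc : (parseAll bb).map pairOf = pairOf p0 :: ts0.map pairOf := by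
    rw [hcons]
    simp
  rw [hmc]
  simp only []
  -- both sides are the same fold
  have htop : pvIntAt (((parseAll bb).dropLast.map tokenOf ++ [fixLastA (tokenOf ((parseAll bb).getLast hts))]).map mangleA) 0 1
      = (pairOf p0).2 := by
    have h := congrArg Prod.snd (hAt 0)
    rw [hmc] at h
    simpa [PySem.List.pyGetD_zero_cons] using h
  rw [htop]
  have hfn : (fun (st : PySem.Dict Int Int × Int) (i : Int) =>
      if st.2 ≤ ((List.map tokenOf (parseAll bb).dropLast ++ [fixLastA (tokenOf ((parseAll bb).getLast hts))]).length : Int) - 1 then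
        if pvIntAt (List.map mangleA (List.map tokenOf (parseAll bb).dropLast ++ [fixLastA (tokenOf ((parseAll bb).getLast hts))])) st.2 1 = i then
          (st.1.insert i (pvIntAt (List.map mangleA (List.map tokenOf (parseAll bb).dropLast ++ [fixLastA (tokenOf ((parseAll bb).getLast hts))])) st.2 0), st.2 + 1)
        else (st.1.insert i 0, st.2)
      else (st.1.insert i 0, st.2))
    = (fun (st : PySem.Dict Int Int × Int) (p : Int) =>
      if st.2 < ((List.map pairOf (parseAll bb)).length : Int) then
        if (PySem.List.pyGetD (List.map pairOf (parseAll bb)) st.2 ((0 : Int), (0 : Int))).2 = p then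
          (st.1.insert p (PySem.List.pyGetD (List.map pairOf (parseAll bb)) st.2 ((0 : Int), (0 : Int))).1, st.2 + 1)
        else (st.1.insert p 0, st.2)
      else (st.1.insert p 0, st.2)) := by
    funext st i
    have h1 := congrArg Prod.snd (hAt st.2)
    have h0 := congrArg Prod.fst (hAt st.2)
    simp only [] at h1 h0
    rw [h1, h0, hlen1]
    have hiff : (st.2 ≤ ((parseAll bb).length : Int) - 1)
        = (st.2 < (((parseAll bb).map pairOf).length : Int)) := by
      simp only [List.length_map]
      apply propext
      omega
    simp only [hiff]
  rw [hfn, hmc]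

-- ===== VERDICT =====
theorem convert_equation_dict_spec : Claim_equal_convert_equation_dict := by
  intro s hdom hpre
  unfold Spec_convert_equation_dict
  unfold Pre_convert_equation_dict at hpre
  by_cases hsuf : ['=', '0'].isSuffixOf (s.toList.filter (fun c => !(c == ' ' || c == '*'))) = true
  · obtain ⟨u, hu⟩ : ∃ u, u ++ ['=', '0'] = s.toList.filter (fun c => !(c == ' ' || c == '*')) :=
      List.isSuffixOf_iff_suffix.mp hsuf
    have hdd : (s.toList.filter (fun c => !(c == ' ' || c == '*'))).dropLast.dropLast = u := by
      rw [← hu, show u ++ ['=', '0'] = (u ++ ['=']) ++ ['0'] by simp,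
        List.dropLast_concat, List.dropLast_concat]
    simp only [hsuf, if_true, hdd, Bool.and_eq_true, Bool.not_eq_true'] at hpre
    have hcont : '=' ∉ u := by
      have := hpre.1
      simp only [List.contains_eq_mem, decide_eq_false_iff_not] at this
      exact this
    exact main_core s u (by rw [clean_filter, ← hu]; exact rep_eq0_suffix u hcont) hpre.2
  · simp only [hsuf, if_false, Bool.and_eq_true, Bool.not_eq_true', Bool.false_eq_true] at hpre
    have hcont : '=' ∉ s.toList.filter (fun c => !(c == ' ' || c == '*')) := by
      have := hpre.1
      simp only [List.contains_eq_mem, decide_eq_false_iff_not] at this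
      exact this
    exact main_core s _ (by rw [clean_filter]; exact rep_eq0_id _ hcont) hpre.2
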